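-- pv_equiv track=rewrite | github.com/nguyennhuttin/cluster | full_spacer_detection.py | findOneRegion
-- ===== SOURCE A (Python) =====
-- def findOneRegion(spacer):
--     regions = []  # a list of tuples (start:end)
--
--     currStart = 0
--     currEnd = 0
--     isInRegion = False
--
--     for i in range(len(spacer)):
--         if spacer[i] == 1:
--             if not isInRegion:
--                 isInRegion = True
--                 currStart = i
--                 currEnd = i
--
--             currEnd += 1
--
--         elif isInRegion:
--             regions.append((currStart, currEnd))
--             isInRegion = False
--
--     if isInRegion:
--         regions.append((currStart, currEnd))
--
--     sortedRegions = sorted(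
--         regions, key=lambda x: x[1] - x[0], reverse=True)  # already sorted
--     return sortedRegions
-- ===== SOURCE B (Python) =====
-- def findOneRegion(spacer):
--     # Shift-and-compare: a run starts where a 1 follows a non-1 and ends where a
--     # 1 precedes a non-1; detect both boundary kinds in independent passes over
--     # zipped shifted copies, then zip them into (start, end) pairs.
--     starts = [i for i, (p, x) in enumerate(zip([0] + spacer, spacer))
--               if x == 1 and p != 1]
--     ends = [i + 1 for i, (x, q) in enumerate(zip(spacer, spacer[1:] + [0]))
--             if x == 1 and q != 1]
--     return sorted(zip(starts, ends), key=lambda r: r[1] - r[0], reverse=True)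
-- ===== Notes on version B (the rewrite author's own statement) =====
-- stated objective: alternative
-- what changed: Replaced A's single-pass isInRegion/currStart/currEnd state machine with boundary detection: two independent comprehension passes over shifted copies of the list find run starts (a 1 after a non-1) and run ends (a 1 before a non-1), which are zipped into regions; same stable sort by length descending.
import Mathlib
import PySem

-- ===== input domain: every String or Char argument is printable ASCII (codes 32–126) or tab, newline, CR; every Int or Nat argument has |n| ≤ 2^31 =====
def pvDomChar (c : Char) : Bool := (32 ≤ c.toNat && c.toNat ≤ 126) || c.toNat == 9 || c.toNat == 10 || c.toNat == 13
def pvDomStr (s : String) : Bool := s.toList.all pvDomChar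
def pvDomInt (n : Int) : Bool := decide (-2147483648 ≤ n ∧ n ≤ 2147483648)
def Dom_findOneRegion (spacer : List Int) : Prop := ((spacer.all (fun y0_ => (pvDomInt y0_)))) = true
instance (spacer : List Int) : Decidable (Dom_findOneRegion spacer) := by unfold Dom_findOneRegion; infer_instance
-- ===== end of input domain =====

-- B replaces A's isInRegion state machine by boundary detection over shifted copies of the
-- list (run starts and run ends found in two independent passes, then zipped); alternative
-- decomposition, same cost; same stable sort.


-- ===== PORT A =====
-- for i in range(len(spacer)): spacer[i] — i is always in range here, so the pyGetD default is never used
def findOneRegion (spacer : List Int) : List (Int × Int) :=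
  let st := (PySem.List.pyRange 0 spacer.length 1).foldl
    (fun (st : List (Int × Int) × Int × Int × Bool) (i : Int) =>
      let (regions, currStart, currEnd, isInRegion) := st
      if PySem.List.pyGetD spacer i 0 = 1 then
        -- if not isInRegion: isInRegion = True; currStart = i; currEnd = i
        let (currStart, currEnd, isInRegion) :=
          if !isInRegion then (i, i, true) else (currStart, currEnd, isInRegion)
        -- currEnd += 1
        (regions, currStart, currEnd + 1, isInRegion)
      else if isInRegion then
        (regions ++ [(currStart, currEnd)], currStart, currEnd, false)
      else
        (regions, currStart, currEnd, isInRegion))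
    ([], 0, 0, false)
  let regions := if st.2.2.2 then st.1 ++ [(st.2.1, st.2.2.1)] else st.1
  PySem.List.sorted regions (fun x => x.2 - x.1) true

-- ===== PORT B =====
-- the two list comprehensions of Source B: filterMap over enumerate(zip(shifted, spacer))
def findOneRegion_alt (spacer : List Int) : List (Int × Int) :=
  let starts := (PySem.List.enumerate (((0:Int) :: spacer).zip spacer) 0).filterMap
    (fun ipx => if ipx.2.2 = 1 ∧ ipx.2.1 ≠ 1 then some ipx.1 else none)
  let ends := (PySem.List.enumerate (spacer.zip (PySem.List.slice spacer (some 1) none ++ [(0:Int)])) 0).filterMap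
    (fun ixq => if ixq.2.1 = 1 ∧ ixq.2.2 ≠ 1 then some (ixq.1 + 1) else none)
  PySem.List.sorted (starts.zip ends) (fun r => r.2 - r.1) true

-- ===== PRECONDITION & SPEC =====
def Spec_findOneRegion (spacer : List Int) (out : List (Int × Int)) : Prop := out = findOneRegion_alt spacer
instance (spacer : List Int) (out : List (Int × Int)) : Decidable (Spec_findOneRegion spacer out) := by unfold Spec_findOneRegion; infer_instance

-- ===== CLAIM (what is proved, stated in full; the proofs are below) =====
def Claim_equal_findOneRegion : Prop := ∀ (spacer : List Int), Dom_findOneRegion spacer → Spec_findOneRegion spacer (findOneRegion spacer)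

-- ===== LEMMAS AND PROOFS =====

-- structural characterisations of B's two comprehensions: run-start / run-end indices
def pvStarts (p : Int) : List Int → Int → List Int
  | [], _ => []
  | x :: r, s => if x = 1 ∧ p ≠ 1 then s :: pvStarts x r (s + 1) else pvStarts x r (s + 1)

def pvEnds : List Int → Int → List Int
  | [], _ => []
  | x :: r, s => if x = 1 ∧ r.headD 0 ≠ 1 then (s + 1) :: pvEnds r (s + 1) else pvEnds r (s + 1)

lemma pvStarts_irrel (r : List Int) : ∀ (s p q : Int), p ≠ 1 → q ≠ 1 →
    pvStarts p r s = pvStarts q r s := by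
  cases r with
  | nil => intro s p q _ _; rfl
  | cons x r => intro s p q hp hq; simp [pvStarts, hp, hq]

lemma pvStartsB (r : List Int) : ∀ (s p : Int),
    (PySem.List.enumerate ((p :: r).zip r) s).filterMap
      (fun ipx => if ipx.2.2 = 1 ∧ ipx.2.1 ≠ 1 then some ipx.1 else none)
    = pvStarts p r s := by
  induction r with
  | nil => intro s p; simp [PySem.List.enumerate_nil, pvStarts]
  | cons x r ih =>
    intro s p
    rw [List.zip_cons_cons, PySem.List.enumerate_cons, List.filterMap_cons, ih (s + 1) x]
    by_cases h : x = 1 ∧ p ≠ 1 <;> simp [pvStarts, h]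

lemma pvEndsB (r : List Int) : ∀ (s : Int),
    (PySem.List.enumerate (r.zip (r.tail ++ [(0:Int)])) s).filterMap
      (fun ixq => if ixq.2.1 = 1 ∧ ixq.2.2 ≠ 1 then some (ixq.1 + 1) else none)
    = pvEnds r s := by
  induction r with
  | nil => intro s; simp [PySem.List.enumerate_nil, pvEnds]
  | cons x r ih =>
    intro s
    have hz : (x :: r).zip ((x :: r).tail ++ [(0:Int)]) =
        (x, r.headD 0) :: r.zip (r.tail ++ [(0:Int)]) := by
      cases r <;> simp
    rw [hz, PySem.List.enumerate_cons, List.filterMap_cons, ih (s + 1)]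
    by_cases h : x = 1 ∧ r.headD 0 ≠ 1 <;>
      simp only [pvEnds, List.headD] at h ⊢ <;> simp [h]

-- A's loop body, taking the pair (index, element) instead of indexing into spacer
def pvStepE (st : List (Int × Int) × Int × Int × Bool) (p : Int × Int) :
    List (Int × Int) × Int × Int × Bool :=
  let (regions, currStart, currEnd, isInRegion) := st
  if p.2 = 1 then
    let (currStart, currEnd, isInRegion) :=
      if !isInRegion then (p.1, p.1, true) else (currStart, currEnd, isInRegion)
    (regions, currStart, currEnd + 1, isInRegion)
  else if isInRegion then
    (regions ++ [(currStart, currEnd)], currStart, currEnd, false)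
  else
    (regions, currStart, currEnd, isInRegion)

def pvFinish (st : List (Int × Int) × Int × Int × Bool) : List (Int × Int) :=
  if st.2.2.2 then st.1 ++ [(st.2.1, st.2.2.1)] else st.1

lemma pvA_eq_enum (spacer : List Int) :
    findOneRegion spacer =
      PySem.List.sorted
        (pvFinish ((PySem.List.enumerate spacer 0).foldl pvStepE ([], 0, 0, false)))
        (fun x => x.2 - x.1) true := by
  rw [PySem.List.enumerate_eq_map_pyRange (d := 0), List.foldl_map]
  rfl

-- the key invariant: A's fold produces exactly the zip of start and end boundaries
lemma pvKey (xs : List Int) :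
    (∀ (s : Int) (rs : List (Int × Int)) (cs ce : Int),
       pvFinish ((PySem.List.enumerate xs s).foldl pvStepE (rs, cs, ce, false)) =
         rs ++ (pvStarts 0 xs s).zip (pvEnds xs s))
    ∧ (∀ (s : Int) (rs : List (Int × Int)) (cs : Int),
       pvFinish ((PySem.List.enumerate xs s).foldl pvStepE (rs, cs, s, true)) =
         rs ++ (cs :: pvStarts 1 xs s).zip
           (if xs.headD 0 ≠ 1 then s :: pvEnds xs s else pvEnds xs s)) := by
  induction xs with
  | nil =>
    constructor
    · intro s rs cs ce; simp [PySem.List.enumerate_nil, pvFinish, pvStarts, pvEnds]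
    · intro s rs cs; simp [PySem.List.enumerate_nil, pvFinish, pvStarts, pvEnds]
  | cons x rest ih =>
    constructor
    · intro s rs cs ce
      rw [PySem.List.enumerate_cons]
      by_cases hx : x = 1
      · simp only [List.foldl_cons, pvStepE, hx, if_pos]
        norm_num
        rw [ih.2 (s + 1) rs s]
        simp [pvStarts, pvEnds]
      · simp only [List.foldl_cons, pvStepE, hx]
        norm_num
        rw [ih.1 (s + 1) rs cs ce]
        simp only [pvStarts, pvEnds, hx, false_and, if_false]
        rw [pvStarts_irrel rest (s + 1) x 0 hx (by norm_num)]
    · intro s rs cs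
      rw [PySem.List.enumerate_cons]
      by_cases hx : x = 1
      · simp only [List.foldl_cons, pvStepE, hx, if_pos]
        norm_num
        rw [ih.2 (s + 1) rs cs]
        simp [pvStarts, pvEnds]
      · simp only [List.foldl_cons, pvStepE, hx]
        norm_num
        rw [ih.1 (s + 1) (rs ++ [(cs, s)]) cs s]
        simp only [pvStarts, pvEnds, hx, false_and, if_false]
        rw [pvStarts_irrel rest (s + 1) x 0 hx (by norm_num)]
        simp [List.append_assoc]

-- ===== VERDICT (by name: the statement is the Claim_ definition above) =====
theorem findOneRegion_spec : Claim_equal_findOneRegion := by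
  intro spacer _
  show findOneRegion spacer = findOneRegion_alt spacer
  rw [pvA_eq_enum, (pvKey spacer).1 0 [] 0 0]
  unfold findOneRegion_alt
  rw [pvStartsB spacer 0 0, PySem.List.slice_from_one, pvEndsB spacer 0]
  rfl
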